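-- pv_equiv track=rewrite | github.com/katherine4191/Algorithm-Study | kyeonghyeon/PART2/CHAPTER3_GREEDY/큰수의법칙.py | solution
-- ===== SOURCE A (Python) =====
-- def solution(input_size, limitation, continuous, candidates):
--     candidates.sort()
--
--     answer = 0
--     iteration = 0
--
--     for _ in range(limitation):
--         max_value = candidates[-1]
--
--         if iteration >= continuous:
--             answer += candidates[-2]
--             iteration = 0
--             continue
--
--         answer += max_value
--         iteration += 1
--
--     return answer
-- ===== SOURCE B (Python) =====
-- def solution(input_size, limitation, continuous, candidates):
--     candidates.sort()
--     if limitation <= 0: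
--         return 0
--     mx = candidates[-1]
--     if limitation <= continuous:
--         return limitation * mx
--     snd = candidates[-2]
--     if continuous <= 0:
--         return limitation * snd
--     full, rem = divmod(limitation, continuous + 1)
--     return full * (continuous * mx + snd) + rem * mx
-- ===== Notes on version B (the rewrite author's own statement) =====
-- stated objective: alternative
-- what changed: Replaces the step-by-step simulation loop over range(limitation) with closed-form divmod arithmetic: full cycles of (continuous*max + secondmax) plus remainder*max, reading the second maximum only when the loop would.
import Mathlib
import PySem

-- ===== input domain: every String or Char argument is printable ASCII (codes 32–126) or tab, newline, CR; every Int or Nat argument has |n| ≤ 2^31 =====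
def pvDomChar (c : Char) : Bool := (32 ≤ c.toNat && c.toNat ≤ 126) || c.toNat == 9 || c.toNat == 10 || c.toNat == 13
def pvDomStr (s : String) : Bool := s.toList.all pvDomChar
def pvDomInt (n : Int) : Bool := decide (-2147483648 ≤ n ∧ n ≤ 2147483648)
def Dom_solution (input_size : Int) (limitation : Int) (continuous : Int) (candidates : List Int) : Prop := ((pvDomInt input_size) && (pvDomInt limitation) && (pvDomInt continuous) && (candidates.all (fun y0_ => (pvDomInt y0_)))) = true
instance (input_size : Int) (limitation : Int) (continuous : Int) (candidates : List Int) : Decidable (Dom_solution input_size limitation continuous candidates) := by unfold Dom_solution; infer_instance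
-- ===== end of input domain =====

-- B replaces A's step-by-step simulation loop over range(limitation) by closed-form divmod arithmetic.
-- Both A and B sort 'candidates' in place; the equivalence proved here is about the return value.

-- ===== PORT A =====
def solution (input_size : Int) (limitation : Int) (continuous : Int) (candidates : List Int) : Int :=
  let cand := PySem.List.sorted candidates (fun x => x) false
  let res := (PySem.List.pyRange 0 limitation 1).foldl
    (fun (st : Int × Int) _ =>
      let max_value := (PySem.List.pyGet? cand (-1)).getD 0
      if continuous ≤ st.2 then
        (st.1 + (PySem.List.pyGet? cand (-2)).getD 0, 0)
      else
        (st.1 + max_value, st.2 + 1))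
    ((0 : Int), (0 : Int))
  res.1

-- ===== PORT B =====
def solution_alt (input_size : Int) (limitation : Int) (continuous : Int) (candidates : List Int) : Int :=
  let cand := PySem.List.sorted candidates (fun x => x) false
  if limitation ≤ 0 then 0
  else
    let mx := (PySem.List.pyGet? cand (-1)).getD 0
    if limitation ≤ continuous then limitation * mx
    else
      let snd := (PySem.List.pyGet? cand (-2)).getD 0
      if continuous ≤ 0 then limitation * snd
      else
        let full := PySem.Int.floordiv limitation (continuous + 1)
        let rem := PySem.Int.mod limitation (continuous + 1)
        full * (continuous * mx + snd) + rem * mx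

-- ===== PRECONDITION & SPEC =====
-- Pre_ excludes exactly the inputs on which Python A raises IndexError: an empty list with
-- limitation ≥ 1 (candidates[-1]), and a singleton list when the loop reaches the second
-- maximum, i.e. limitation ≥ 1 and limitation > continuous (candidates[-2]).
def Pre_solution (input_size : Int) (limitation : Int) (continuous : Int) (candidates : List Int) : Prop :=
  limitation ≤ 0 ∨ (1 ≤ candidates.length ∧ (limitation ≤ continuous ∨ 2 ≤ candidates.length))
instance (input_size : Int) (limitation : Int) (continuous : Int) (candidates : List Int) : Decidable (Pre_solution input_size limitation continuous candidates) := by unfold Pre_solution; infer_instance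
def pvWitness_solution : Int × Int × Int × List Int := (3, 8, 2, [2, 4, 5, 4, 6])

def Spec_solution (input_size : Int) (limitation : Int) (continuous : Int) (candidates : List Int) (out : Int) : Prop := out = solution_alt input_size limitation continuous candidates
instance (input_size : Int) (limitation : Int) (continuous : Int) (candidates : List Int) (out : Int) : Decidable (Spec_solution input_size limitation continuous candidates out) := by unfold Spec_solution; infer_instance

-- ===== CLAIM (what is proved, stated in full; the proofs are below) =====
def Claim_equal_solution : Prop := ∀ (input_size : Int) (limitation : Int) (continuous : Int) (candidates : List Int), Dom_solution input_size limitation continuous candidates → Pre_solution input_size limitation continuous candidates → Spec_solution input_size limitation continuous candidates (solution input_size limitation continuous candidates)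

-- ===== LEMMAS AND PROOFS =====

-- A's loop body, with max/secondmax and the threshold abstracted.
def pvStep (mx snd c : Int) (st : Int × Int) : Int × Int :=
  if c ≤ st.2 then (st.1 + snd, 0) else (st.1 + mx, st.2 + 1)

theorem pv_foldl_const {α : Type} (f : Int × Int → Int × Int) (l : List α) (init : Int × Int) :
    l.foldl (fun st _ => f st) init = f^[l.length] init := by
  induction l generalizing init with
  | nil => rfl
  | cons a t ih => simp [List.foldl_cons, ih, Function.iterate_succ_apply]

-- continuous ≤ 0: every step adds snd and keeps iteration at 0.
theorem pv_iter_nonpos (mx snd c : Int) (hc : c ≤ 0) (k : Nat) (a : Int) :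
    (pvStep mx snd c)^[k] (a, 0) = (a + k * snd, 0) := by
  induction k generalizing a with
  | zero => simp
  | succ k ih =>
    rw [Function.iterate_succ_apply]
    have : pvStep mx snd c (a, 0) = (a + snd, 0) := by simp [pvStep, hc]
    rw [this, ih]
    simp only [Prod.mk.injEq]
    refine ⟨by push_cast; ring, trivial⟩

-- within one cycle (k ≤ c steps from iteration 0): k maxes, iteration = k.
theorem pv_iter_cycle (mx snd : Int) (c : Nat) (k : Nat) (hk : k ≤ c) (a : Int) :
    (pvStep mx snd (c : Int))^[k] (a, 0) = (a + k * mx, (k : Int)) := by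
  induction k generalizing a with
  | zero => simp
  | succ k ih =>
    rw [Function.iterate_succ_apply']
    have hk' : k ≤ c := Nat.le_of_succ_le hk
    rw [ih hk']
    have hlt : ¬ ((c : Int) ≤ (k : Int)) := by exact_mod_cast Nat.not_le.mpr (Nat.lt_of_succ_le hk)
    simp only [pvStep, if_neg hlt, Prod.mk.injEq]
    refine ⟨by push_cast; ring, by push_cast; ring⟩

-- q full cycles of length c+1: each contributes c*mx + snd.
theorem pv_iter_full (mx snd : Int) (c : Nat) (q : Nat) :
    (pvStep mx snd (c : Int))^[q * (c + 1)] ((0 : Int), (0 : Int)) = ((q : Int) * ((c : Int) * mx + snd), 0) := by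
  induction q with
  | zero => simp
  | succ q ih =>
    have h : (q + 1) * (c + 1) = 1 + (c + q * (c + 1)) := by ring
    rw [h, Function.iterate_add_apply, Function.iterate_add_apply, ih]
    rw [pv_iter_cycle mx snd c c (le_refl c)]
    have hstep : pvStep mx snd (c : Int) ((q : Int) * ((c : Int) * mx + snd) + (c : Int) * mx, (c : Int))
        = ((q : Int) * ((c : Int) * mx + snd) + (c : Int) * mx + snd, 0) := by
      simp [pvStep]
    rw [Function.iterate_one, hstep]
    simp only [Prod.mk.injEq]
    refine ⟨by push_cast; ring, trivial⟩

theorem pv_iter_closed (mx snd : Int) (c : Nat) (n : Nat) :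
    ((pvStep mx snd (c : Int))^[n] ((0 : Int), (0 : Int))).1
      = ((n / (c + 1) : Nat) : Int) * ((c : Int) * mx + snd) + ((n % (c + 1) : Nat) : Int) * mx := by
  have hr : n % (c + 1) ≤ c := Nat.le_of_lt_succ (Nat.mod_lt n (Nat.succ_pos c))
  have hsplit : n = n % (c + 1) + (n / (c + 1)) * (c + 1) := by
    conv_lhs => rw [← Nat.mod_add_div n (c + 1)]
    ring
  conv_lhs => rw [hsplit]
  rw [Function.iterate_add_apply, pv_iter_full, pv_iter_cycle mx snd c _ hr]

-- ===== VERDICT (by name: the statement is the Claim_ definition above) =====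
theorem solution_spec : Claim_equal_solution := by
  intro input_size limitation continuous candidates _ _
  unfold Spec_solution solution solution_alt
  dsimp only
  generalize (PySem.List.sorted candidates (fun x => x) false) = cand
  generalize hmx : ((PySem.List.pyGet? cand (-1)).getD 0) = mx
  generalize hsnd : ((PySem.List.pyGet? cand (-2)).getD 0) = snd
  have hfold : (PySem.List.pyRange 0 limitation 1).foldl
      (fun (st : Int × Int) _ =>
        if continuous ≤ st.2 then (st.1 + snd, 0) else (st.1 + mx, st.2 + 1))
      ((0 : Int), (0 : Int))
      = (pvStep mx snd continuous)^[(PySem.List.pyRange 0 limitation 1).length] ((0 : Int), (0 : Int)) :=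
    pv_foldl_const (pvStep mx snd continuous) _ _
  rw [hfold]
  by_cases hlim : limitation ≤ 0
  · rw [PySem.List.pyRange_one_eq_nil (by omega : limitation ≤ 0)]
    simp [hlim]
  · have hlen : (PySem.List.pyRange 0 limitation 1).length = limitation.toNat := by
      rw [PySem.List.length_pyRange_one]; omega
    rw [hlen, if_neg hlim]
    have hlimcast : ((limitation.toNat : Int)) = limitation := Int.toNat_of_nonneg (by omega)
    by_cases hle : limitation ≤ continuous
    · -- the loop never reaches the threshold: limitation maxes
      rw [if_pos hle]
      have hcc : continuous = ((continuous.toNat : Nat) : Int) :=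
        (Int.toNat_of_nonneg (by omega)).symm
      rw [hcc, pv_iter_cycle mx snd continuous.toNat limitation.toNat (by omega)]
      dsimp only
      rw [hlimcast]; ring
    · rw [if_neg hle]
      by_cases hc : continuous ≤ 0
      · rw [if_pos hc, pv_iter_nonpos mx snd continuous hc]
        dsimp only
        conv_rhs => rw [← hlimcast]
        ring
      · rw [if_neg hc]
        have hccast : ((continuous.toNat : Int)) = continuous := Int.toNat_of_nonneg (by omega)
        rw [← hccast, pv_iter_closed mx snd continuous.toNat limitation.toNat]
        have hdiv : PySem.Int.floordiv limitation (↑continuous.toNat + 1)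
            = ((limitation.toNat / (continuous.toNat + 1) : Nat) : Int) := by
          rw [← hlimcast]
          exact_mod_cast PySem.Int.floordiv_natCast limitation.toNat (continuous.toNat + 1)
        have hmod : PySem.Int.mod limitation (↑continuous.toNat + 1)
            = ((limitation.toNat % (continuous.toNat + 1) : Nat) : Int) := by
          rw [← hlimcast]
          exact_mod_cast PySem.Int.mod_natCast limitation.toNat (continuous.toNat + 1)
        rw [hdiv, hmod]
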